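-- pv_equiv track=rewrite | github.com/berkanyikilmaz/CS115-Lab-Assignments | LAB 3/Lab03_MustafaBerkanYıkılmaz_Q1.py | is_neat_reversible
-- ===== SOURCE A (Python) =====
-- def is_neat_reversible(s):
--     """
--     Finds whether or not the string is 'neat reversible'. If a string is the same as the original string
--     after moving its first character to the end and reversing it, it is neat reversible.
--
--     Parameters
--     ----------
--     s (string): string which will be checked if it is neat reversible or not
--
--     Returns
--     -------
--     bool: True if string is neat reversible
--           False if string is not neat reversible
--
--     """
--     if s == '':
--         return False
--     else:
--         empty = ''
--
--         empty += s[0]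
--
--         for i in s[:-len(s):-1]:
--             empty += i
--
--         if s == empty:
--             return True
--         else:
--             return False
-- ===== SOURCE B (Python) =====
-- def is_neat_reversible(s):
--     if not s:
--         return False
--     i, j = 1, len(s) - 1
--     while i < j:
--         if s[i] != s[j]:
--             return False
--         i += 1
--         j -= 1
--     return True
-- ===== Notes on version B (the rewrite author's own statement) =====
-- stated objective: simpler
-- what changed: B replaces A's build-the-transformed-string-and-compare (constructing s[0] plus the reversed tail by repeated string concatenation, then an equality test) with an in-place two-pointer scan over the tail that compares characters pairwise and returns early on the first mismatch, allocating nothing.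
import Mathlib
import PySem

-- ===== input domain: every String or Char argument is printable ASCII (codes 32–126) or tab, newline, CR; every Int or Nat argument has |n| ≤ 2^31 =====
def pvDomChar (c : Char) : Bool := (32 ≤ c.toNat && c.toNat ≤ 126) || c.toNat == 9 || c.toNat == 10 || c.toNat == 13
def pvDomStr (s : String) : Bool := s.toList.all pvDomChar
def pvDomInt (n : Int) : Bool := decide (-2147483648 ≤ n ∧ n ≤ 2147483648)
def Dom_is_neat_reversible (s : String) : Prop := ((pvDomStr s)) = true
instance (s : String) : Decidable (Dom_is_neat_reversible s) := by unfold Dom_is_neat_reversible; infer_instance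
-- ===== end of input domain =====

-- B replaces A's build-the-transformed-string-and-compare with a two-pointer pairwise scan of the tail (simpler, no allocation).


-- ===== PORT A =====
-- transliteration: if s == '': False; else empty = '' + s[0]; for i in s[:-len(s):-1]: empty += i; return s == empty
def is_neat_reversible (s : String) : Bool :=
  if s.toList == [] then false
  else
    match s.toList with
    | [] => false  -- unreachable (s is nonempty here)
    | c :: _ =>
      match PySem.List.slice? s.toList none (some (-(s.toList.length : Int))) (-1) with
      | none => false  -- unreachable (step = -1 ≠ 0)
      | some revTail =>
        let empty := revTail.foldl (fun acc i => acc ++ [i]) [c]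
        s.toList == empty

-- ===== PORT B =====
-- two-pointer while-loop of Source B: i := 1, j := len(s)-1; while i < j compare s[i], s[j]
def pvTwoPtr (cs : List Char) (i j : Nat) : Bool :=
  if i < j then
    if cs.getD i ' ' == cs.getD j ' ' then pvTwoPtr cs (i + 1) (j - 1) else false
  else true
termination_by j - i

def is_neat_reversible_alt (s : String) : Bool :=
  let cs := s.toList
  if cs.isEmpty then false
  else pvTwoPtr cs 1 (cs.length - 1)

-- ===== PRECONDITION & SPEC =====
def Spec_is_neat_reversible (s : String) (out : Bool) : Prop := out = is_neat_reversible_alt s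
instance (s : String) (out : Bool) : Decidable (Spec_is_neat_reversible s out) := by unfold Spec_is_neat_reversible; infer_instance

-- ===== CLAIM (what is proved, stated in full; the proofs are below) =====
def Claim_equal_is_neat_reversible : Prop := ∀ (s : String), Dom_is_neat_reversible s → Spec_is_neat_reversible s (is_neat_reversible s)

-- ===== LEMMAS AND PROOFS =====

-- the slice s[:-len(s):-1] on a nonempty string is the reversed tail
lemma pv_slice_tailrev {α : Type} (a : α) (l : List α) :
    PySem.List.slice? (a :: l) none (some (-((a :: l).length : Int))) (-1) = some l.reverse := by
  simp only [PySem.List.slice?, PySem.List.sliceIndices]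
  norm_num
  have hc : (-1 : Int) < (l.length : Int) := by omega
  simp only [if_pos hc, Int.sub_zero]
  have hcnt : (if (0:Int) < ↑l.length then ((l.length : Int)).toNat else 0) = l.length := by
    split_ifs <;> omega
  rw [hcnt]
  apply List.ext_getElem
  · simp
  · intro i h1 h2
    simp only [List.getElem_map, List.getElem_range, List.getElem_reverse]
    simp only [List.length_map, List.length_range] at h1
    have hi : ((l.length : Int) + -(i : Int)).toNat = (l.length - 1 - i) + 1 := by omega
    simp only [hi, List.getElem_cons_succ]

-- B's loop succeeds iff every symmetric pair of positions in [i, j] matches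
lemma pv_twoPtr_iff (cs : List Char) (i j : Nat) :
    pvTwoPtr cs i j = true ↔ ∀ k, i ≤ k → k ≤ j → cs.getD k ' ' = cs.getD (i + j - k) ' ' := by
  fun_induction pvTwoPtr cs i j with
  | case1 i j hlt heq ih =>
    rw [ih]
    constructor
    · intro h k hk1 hk2
      rcases Nat.eq_or_lt_of_le hk1 with rfl | hk1'
      · have hidx : i + j - i = j := by omega
        rw [hidx]; exact beq_iff_eq.mp heq
      · rcases Nat.eq_or_lt_of_le hk2 with rfl | hk2'
        · have hidx : i + k - k = i := by omega
          rw [hidx]; exact (beq_iff_eq.mp heq).symm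
        · have := h k (by omega) (by omega)
          have hidx : i + 1 + (j - 1) - k = i + j - k := by omega
          rwa [hidx] at this
    · intro h k hk1 hk2
      have := h k (by omega) (by omega)
      have hidx : i + j - k = i + 1 + (j - 1) - k := by omega
      rwa [hidx] at this
  | case2 i j hlt hne =>
    simp only [Bool.false_eq_true, false_iff]
    intro h
    have := h i (le_refl i) (by omega)
    have hidx : i + j - i = j := by omega
    rw [hidx] at this
    exact hne (beq_iff_eq.mpr this)
  | case3 i j hlt =>
    simp only [true_iff]
    intro k hk1 hk2
    obtain ⟨rfl, rfl⟩ : k = i ∧ k = j := by omega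
    congr 1; omega

-- a list equals its reverse iff all symmetric positions agree
lemma pv_palin_iff (rest : List Char) :
    rest = rest.reverse ↔
      ∀ m, m < rest.length → rest.getD m ' ' = rest.getD (rest.length - 1 - m) ' ' := by
  constructor
  · intro h m hm
    have hm' : rest.length - 1 - m < rest.length := by omega
    conv_lhs => rw [h]
    rw [List.getD_eq_getElem _ ' ' (by simpa using hm), List.getElem_reverse,
      List.getD_eq_getElem rest ' ' hm']
  · intro h
    apply List.ext_getElem
    · simp
    · intro i h1 h2
      rw [List.getElem_reverse]
      have := h i h1
      rw [List.getD_eq_getElem rest ' ' h1, List.getD_eq_getElem rest ' ' (by omega)] at this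
      exact this

-- ===== VERDICT (by name: the statement is the Claim_ definition above) =====
theorem is_neat_reversible_spec : Claim_equal_is_neat_reversible := by
  intro s _
  unfold Spec_is_neat_reversible is_neat_reversible is_neat_reversible_alt
  cases h : s.toList with
  | nil => simp
  | cons c rest =>
    simp only [List.isEmpty_cons, Bool.false_eq_true, if_false, List.cons_ne_nil, beq_iff_eq]
    rw [pv_slice_tailrev c rest]
    simp only [PySem.List.foldl_append_singleton, List.length_cons, Nat.add_sub_cancel,
      List.singleton_append]
    rw [Bool.eq_iff_iff, beq_iff_eq, List.cons_eq_cons, pv_twoPtr_iff, pv_palin_iff]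
    constructor
    · intro ⟨_, hpal⟩ k hk1 hk2
      obtain ⟨m, rfl⟩ : ∃ m, k = m + 1 := ⟨k - 1, by omega⟩
      have hidx : 1 + rest.length - (m + 1) = (rest.length - 1 - m) + 1 := by omega
      rw [hidx]
      simp only [List.getD_cons_succ]
      exact hpal m (by omega)
    · intro h
      refine ⟨rfl, fun m hm => ?_⟩
      have := h (m + 1) (by omega) (by omega)
      have hidx : 1 + rest.length - (m + 1) = (rest.length - 1 - m) + 1 := by omega
      rw [hidx] at this
      simpa only [List.getD_cons_succ] using this
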